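-- pv_equiv track=rewrite | github.com/Twigums/6.006 | find_first_missing_element.py | incrementSearch
-- ===== SOURCE A (Python) =====
-- def incrementSearch(A, point):
--
--     n = len(A) # define n as the number of elements in array, A
--
--     # similar to above function;
--     # this time left is our minimum bounds
--     left = point
--     right = n - 1
--
--     # similar to above function
--     # but this time, we compare middle to both left and right indices as well as A[middle] to A[left] and A[right] respectively
--     # if they are not the same, then that means a gap must exist in that side of the array
--     # otherwise, it will return the maximum value in the array + 1
--     while right - left >= 0:
--
--         middle = left + (right - left) // 2
--
--         if left + 1 == right:
--             return A[left] + 1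
--
--         if middle - left != A[middle] - A[left]:
--             right = middle
--
--         elif right - middle != A[right] - A[middle]:
--             left = middle
--
--         else:
--             return A[n - 1] + 1
--
--     return None # to cover bases
-- ===== SOURCE B (Python) =====
-- def incrementSearch(A, point):
--     # find the index whose value determines the answer, then read the array once
--     i = _answer_index(A, point, len(A) - 1, len(A))
--     return None if i is None else A[i] + 1
--
-- def _answer_index(A, l, r, n):
--     # key j -> A[j] - j is constant on a range exactly when the range has no gap
--     if r - l < 0:
--         return None
--     if l + 1 == r:
--         return l
--     m = (l + r) // 2
--     key = lambda j: A[j] - j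
--     if key(m) != key(l):
--         return _answer_index(A, l, m, n)
--     if key(r) != key(m):
--         return _answer_index(A, m, r, n)
--     return n - 1
-- ===== Notes on version B (the rewrite author's own statement) =====
-- stated objective: alternative
-- what changed: B splits the task into an index-returning recursive search that compares the invariant key j -> A[j] - j (constant exactly on gap-free ranges) and a single final read A[i] + 1, where A interleaves raw value-difference comparisons and value returns inside one iterative while-loop over mutable bounds. Pre_ excludes only point < -len(A), where both A and B raise IndexError.
import Mathlib
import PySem

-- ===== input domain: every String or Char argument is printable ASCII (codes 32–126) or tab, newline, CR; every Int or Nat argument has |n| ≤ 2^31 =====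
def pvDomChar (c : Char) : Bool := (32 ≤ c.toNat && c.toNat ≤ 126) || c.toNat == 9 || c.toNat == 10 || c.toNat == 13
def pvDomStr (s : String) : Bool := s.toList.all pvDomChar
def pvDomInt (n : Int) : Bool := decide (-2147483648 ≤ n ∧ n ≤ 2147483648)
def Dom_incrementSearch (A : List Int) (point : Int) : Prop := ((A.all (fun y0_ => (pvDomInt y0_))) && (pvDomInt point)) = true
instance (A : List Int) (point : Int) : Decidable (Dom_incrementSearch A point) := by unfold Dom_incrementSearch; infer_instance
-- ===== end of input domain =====

-- B replaces A's iterative while-loop (which compares raw value differences and returns array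
-- values from inside the loop) by an index-returning recursive search over the key j ↦ A[j] - j,
-- with a single array read A[i] + 1 performed at the end; same results on all of Pre_.

-- termination helpers, cited by the decreasing_by blocks of the ports and the proof
theorem pv_mid_eq (l r : Int) :
    PySem.Int.floordiv (l + r) 2 = l + PySem.Int.floordiv (r - l) 2 := by
  rw [PySem.Int.floordiv_eq_ediv_of_pos (show (0:Int) < 2 by norm_num),
      PySem.Int.floordiv_eq_ediv_of_pos (show (0:Int) < 2 by norm_num)]
  omega

theorem pv_dec_left (l r : Int) (h0 : 0 ≤ r - l) (hne : ¬ l + 1 = r) (hd0 : ¬ r - l = 0) :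
    (l + PySem.Int.floordiv (r - l) 2 - l).toNat < (r - l).toNat := by
  rw [PySem.Int.floordiv_eq_ediv_of_pos (show (0:Int) < 2 by norm_num)]
  omega

theorem pv_dec_right (l r : Int) (h0 : 0 ≤ r - l) (hne : ¬ l + 1 = r) (hd0 : ¬ r - l = 0) :
    (r - (l + PySem.Int.floordiv (r - l) 2)).toNat < (r - l).toNat := by
  rw [PySem.Int.floordiv_eq_ediv_of_pos (show (0:Int) < 2 by norm_num)]
  omega

theorem pv_fd_zero : PySem.Int.floordiv (0:Int) 2 = 0 := by decide

-- ===== PORT A =====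
-- the while-loop of A: state (left, right), n = len(A); middle = left + (right-left)//2 is
-- written out at each of its uses (same value as Python's single binding)
def incrementSearchLoop (A : List Int) (n l r : Int) : Option Int :=
  if h0 : 0 ≤ r - l then
    if hne : l + 1 = r then
      match PySem.List.pyGet? A l with
      | some al => some (al + 1)
      | none => none                                   -- IndexError (excluded by Pre_)
    else
      match hm : PySem.List.pyGet? A (l + PySem.Int.floordiv (r - l) 2),
            hl : PySem.List.pyGet? A l with
      | some am, some al =>
        if hg : l + PySem.Int.floordiv (r - l) 2 - l ≠ am - al then
          incrementSearchLoop A n l (l + PySem.Int.floordiv (r - l) 2)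
        else
          match hr : PySem.List.pyGet? A r with
          | some ar =>
            if hg2 : r - (l + PySem.Int.floordiv (r - l) 2) ≠ ar - am then
              incrementSearchLoop A n (l + PySem.Int.floordiv (r - l) 2) r
            else
              match PySem.List.pyGet? A (n - 1) with
              | some amax => some (amax + 1)
              | none => none                           -- IndexError (excluded by Pre_)
          | none => none                               -- IndexError (excluded by Pre_)
      | _, _ => none                                   -- IndexError (excluded by Pre_)
  else
    none
termination_by (r - l).toNat
decreasing_by
  · refine pv_dec_left l r h0 hne ?_
    intro hd0
    rw [hd0, pv_fd_zero] at hm hg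
    simp only [add_zero] at hm hg
    rw [hm] at hl
    have := Option.some.inj hl
    apply hg
    omega
  · refine pv_dec_right l r h0 hne ?_
    intro hd0
    rw [hd0, pv_fd_zero] at hm hg2
    have hrl : r = l := by omega
    rw [hrl] at hr
    simp only [add_zero] at hm hg2
    rw [hm] at hr
    have := Option.some.inj hr
    apply hg2
    omega

def incrementSearch (A : List Int) (point : Int) : Option Int :=
  incrementSearchLoop A (PySem.List.len A) point (PySem.List.len A - 1)

-- ===== PORT B =====
-- key = lambda j: A[j] - j  (none = IndexError, which occurs only outside Pre_)
def pvKey (A : List Int) (j : Int) : Option Int :=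
  (PySem.List.pyGet? A j).map (fun v => v - j)

-- the index-returning recursive helper _answer_index(A, l, r, n) of Source B.
-- The key comparisons are on Option values; inside Pre_ every access is in range, so they
-- coincide with Source B's comparisons of the int keys (none arises only outside Pre_).
def pvAnswerIndex (A : List Int) (l r n : Int) : Option Int :=
  if r - l < 0 then
    none
  else if hone : l + 1 = r then
    some l
  else
    if hgap : pvKey A (PySem.Int.floordiv (l + r) 2) ≠ pvKey A l then
      pvAnswerIndex A l (PySem.Int.floordiv (l + r) 2) n
    else if hgap2 : pvKey A r ≠ pvKey A (PySem.Int.floordiv (l + r) 2) then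
      pvAnswerIndex A (PySem.Int.floordiv (l + r) 2) r n
    else
      some (n - 1)
termination_by (r - l).toNat
decreasing_by
  · rw [pv_mid_eq l r]
    refine pv_dec_left l r (by omega) hone ?_
    intro hd0
    rw [pv_mid_eq l r, hd0, pv_fd_zero, add_zero] at hgap
    exact hgap rfl
  · rw [pv_mid_eq l r]
    refine pv_dec_right l r (by omega) hone ?_
    intro hd0
    have hrl : r = l := by omega
    rw [pv_mid_eq l r, hd0, pv_fd_zero, add_zero, hrl] at hgap2
    exact hgap2 rfl

def incrementSearch_alt (A : List Int) (point : Int) : Option Int :=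
  match pvAnswerIndex A point (PySem.List.len A - 1) (PySem.List.len A) with
  | none => none
  | some i =>
    match PySem.List.pyGet? A i with
    | some v => some (v + 1)
    | none => none                                     -- IndexError (outside Pre_)

-- ===== PRECONDITION & SPEC =====
-- Pre_ excludes exactly the inputs with point < -len(A), on which both Pythons raise IndexError
-- (the very first array access is out of range even for Python's negative indexing).
def Pre_incrementSearch (A : List Int) (point : Int) : Prop := -(PySem.List.len A) ≤ point
instance (A : List Int) (point : Int) : Decidable (Pre_incrementSearch A point) := by
  unfold Pre_incrementSearch; infer_instance

def pvWitness_incrementSearch : List Int × Int := ([0, 1, 3, 4], 0)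

def Spec_incrementSearch (A : List Int) (point : Int) (out : Option Int) : Prop := out = incrementSearch_alt A point
instance (A : List Int) (point : Int) (out : Option Int) : Decidable (Spec_incrementSearch A point out) := by unfold Spec_incrementSearch; infer_instance

-- ===== CLAIM (what is proved, stated in full; the proofs are below) =====
def Claim_equal_incrementSearch : Prop := ∀ (A : List Int) (point : Int), Dom_incrementSearch A point → Pre_incrementSearch A point → Spec_incrementSearch A point (incrementSearch A point)

-- ===== LEMMAS AND PROOFS =====

-- an in-range index always yields a value
theorem pv_get_some (A : List Int) (i : Int) (h1 : -(PySem.List.len A) ≤ i)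
    (h2 : i ≤ PySem.List.len A - 1) : ∃ v, PySem.List.pyGet? A i = some v := by
  cases hg : PySem.List.pyGet? A i with
  | some v => exact ⟨v, rfl⟩
  | none =>
    rw [PySem.List.pyGet?_eq_none_iff] at hg
    exfalso
    apply hg
    constructor <;> simp [PySem.List.len_eq] at h1 h2 ⊢ <;> omega

-- the loop of A equals the index search of B followed by the single read, whenever the
-- bounds are in range (which Pre_ guarantees for the initial call)
theorem pv_loop_eq_find (A : List Int) (l r : Int)
    (hbl : -(PySem.List.len A) ≤ l) (hbr : r ≤ PySem.List.len A - 1) :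
    incrementSearchLoop A (PySem.List.len A) l r =
      (match pvAnswerIndex A l r (PySem.List.len A) with
       | none => none
       | some i =>
         match PySem.List.pyGet? A i with
         | some v => some (v + 1)
         | none => none) := by
  rw [incrementSearchLoop.eq_def, pvAnswerIndex.eq_def, pv_mid_eq l r]
  by_cases h0 : 0 ≤ r - l
  · rw [dif_pos h0, if_neg (show ¬ r - l < 0 by omega)]
    by_cases hne : l + 1 = r
    · rw [dif_pos hne, dif_pos hne]
    · rw [dif_neg hne, dif_neg hne]
      have hml : l ≤ l + PySem.Int.floordiv (r - l) 2 := by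
        rw [PySem.Int.floordiv_eq_ediv_of_pos (show (0:Int) < 2 by norm_num)]; omega
      have hmr : l + PySem.Int.floordiv (r - l) 2 ≤ r := by
        rw [PySem.Int.floordiv_eq_ediv_of_pos (show (0:Int) < 2 by norm_num)]; omega
      obtain ⟨am, hm⟩ := pv_get_some A (l + PySem.Int.floordiv (r - l) 2)
        (by omega) (by omega)
      obtain ⟨al, hl⟩ := pv_get_some A l (by omega) (by omega)
      obtain ⟨ar, hr⟩ := pv_get_some A r (by omega) (by omega)
      rw [hm, hl]
      simp only []
      by_cases hg : l + PySem.Int.floordiv (r - l) 2 - l ≠ am - al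
      · rw [dif_pos hg,
            dif_pos (show pvKey A (l + PySem.Int.floordiv (r - l) 2) ≠ pvKey A l by
              simp only [pvKey, hm, hl, Option.map_some, ne_eq, Option.some.injEq]; omega)]
        exact pv_loop_eq_find A l (l + PySem.Int.floordiv (r - l) 2) hbl (by omega)
      · rw [dif_neg hg,
            dif_neg (show ¬ pvKey A (l + PySem.Int.floordiv (r - l) 2) ≠ pvKey A l by
              simp only [pvKey, hm, hl, Option.map_some, ne_eq, Option.some.injEq]; omega)]
        rw [hr]
        simp only []
        by_cases hg2 : r - (l + PySem.Int.floordiv (r - l) 2) ≠ ar - am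
        · rw [dif_pos hg2,
              dif_pos (show pvKey A r ≠ pvKey A (l + PySem.Int.floordiv (r - l) 2) by
                simp only [pvKey, hm, hr, Option.map_some, ne_eq, Option.some.injEq]; omega)]
          exact pv_loop_eq_find A (l + PySem.Int.floordiv (r - l) 2) r (by omega) hbr
        · rw [dif_neg hg2,
              dif_neg (show ¬ pvKey A r ≠ pvKey A (l + PySem.Int.floordiv (r - l) 2) by
                simp only [pvKey, hm, hr, Option.map_some, ne_eq, Option.some.injEq]; omega)]
  · rw [dif_neg h0, if_pos (show r - l < 0 by omega)]
termination_by (r - l).toNat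
decreasing_by
  · refine pv_dec_left l r h0 hne ?_
    intro hd0
    rw [hd0, pv_fd_zero, add_zero] at hg hm
    rw [hm] at hl
    have := Option.some.inj hl
    omega
  · refine pv_dec_right l r h0 hne ?_
    intro hd0
    have hrl : r = l := by omega
    rw [hd0, pv_fd_zero, add_zero] at hg2 hm
    rw [hrl, hm] at hr
    have := Option.some.inj hr
    omega

-- ===== VERDICT (by name: the statement is the Claim_ definition above) =====
theorem incrementSearch_spec : Claim_equal_incrementSearch := by
  intro A point _ hpre
  unfold Spec_incrementSearch incrementSearch incrementSearch_alt
  exact pv_loop_eq_find A point (PySem.List.len A - 1) hpre (by omega)
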